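-- pv_equiv track=rewrite | github.com/thiagocarmoeng/enter_ai_fellowship | core/field_matcher.py | lines_between
-- ===== SOURCE A (Python) =====
-- from typing import Dict, List, Optional
--
-- def lines_between(lines: List[str], start_idx: int, stop_anchors: List[str], max_ahead: int = 8) -> List[str]:
--     """Coleta linhas após start_idx até encontrar um dos rótulos de parada ou atingir max_ahead."""
--     collected = []
--     for j in range(start_idx + 1, min(len(lines), start_idx + 1 + max_ahead)):
--         low = lines[j].lower()
--         if any(a in low for a in stop_anchors):
--             break
--         text = lines[j].strip()
--         if text:
--             collected.append(text)
--     return collected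
-- ===== SOURCE B (Python) =====
-- from typing import List
--
-- def lines_between(lines: List[str], start_idx: int, stop_anchors: List[str], max_ahead: int = 8) -> List[str]:
--     """Anchor-major scan: for each stop anchor find its earliest occurrence in the
--     still-live prefix of the lookahead window, shrinking the cut point each time;
--     then strip-and-filter the surviving prefix."""
--     lo = start_idx + 1
--     window = lines[lo:lo + max_ahead] if max_ahead > 0 else []
--     lows = [l.lower() for l in window]
--     cut = len(lows)
--     for a in stop_anchors:
--         cut = next((i for i, l in enumerate(lows[:cut]) if a in l), cut)
--     return [t for t in (l.strip() for l in window[:cut]) if t]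
-- ===== Notes on version B (the rewrite author's own statement) =====
-- stated objective: alternative
-- what changed: Replaces A's line-major loop-with-break by an anchor-major scan: for each stop anchor independently find its earliest occurrence in the still-live prefix of the lookahead window (shrinking the cut point), then strip-and-filter the surviving prefix.
-- outside the precondition, e.g. on lines_between(['a', 'b'], -2, [], 8): A returns ['b', 'a', 'b'], B returns ['b']
import Mathlib
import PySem

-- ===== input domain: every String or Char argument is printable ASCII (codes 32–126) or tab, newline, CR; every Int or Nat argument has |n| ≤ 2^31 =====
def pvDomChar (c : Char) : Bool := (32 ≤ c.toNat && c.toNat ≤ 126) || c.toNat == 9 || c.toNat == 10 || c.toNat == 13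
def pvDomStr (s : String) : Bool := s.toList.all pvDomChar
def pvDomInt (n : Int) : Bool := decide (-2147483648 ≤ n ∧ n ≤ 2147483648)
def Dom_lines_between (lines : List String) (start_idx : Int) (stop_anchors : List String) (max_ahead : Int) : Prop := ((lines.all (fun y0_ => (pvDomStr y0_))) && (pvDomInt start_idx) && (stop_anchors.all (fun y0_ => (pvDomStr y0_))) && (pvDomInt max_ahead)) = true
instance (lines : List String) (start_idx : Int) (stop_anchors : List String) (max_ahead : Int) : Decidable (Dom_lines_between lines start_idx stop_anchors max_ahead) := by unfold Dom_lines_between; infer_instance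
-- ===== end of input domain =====

-- B replaces A's line-major break-loop with an anchor-major scan (earliest hit per anchor,
-- minimum = cut point), then strips-and-filters the kept prefix; objective: alternative, not speed.

-- ===== PORT A =====
-- the for-loop with break: recursion over the index list, accumulator = collected
def lines_between_go (lines : List String) (stop_anchors : List String) : List Int → List String → List String
  | [], collected => collected
  | j :: js, collected =>
    match PySem.List.pyGet? lines j with
    | none => collected      -- IndexError in Python; excluded by Pre_lines_between
    | some s =>
      let low := PySem.Str.lower s
      if stop_anchors.any (fun a => PySem.Str.isIn a low) then collected
      else
        let text := PySem.Str.strip s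
        if text ≠ "" then lines_between_go lines stop_anchors js (collected ++ [text])
        else lines_between_go lines stop_anchors js collected

def lines_between (lines : List String) (start_idx : Int) (stop_anchors : List String) (max_ahead : Int) : List String :=
  lines_between_go lines stop_anchors
    (PySem.List.pyRange (start_idx + 1) (min (lines.length : Int) (start_idx + 1 + max_ahead)) 1) []

-- ===== PORT B =====
def lines_between_alt (lines : List String) (start_idx : Int) (stop_anchors : List String) (max_ahead : Int) : List String :=
  let lo := start_idx + 1
  let window := if 0 < max_ahead then PySem.List.slice lines (some lo) (some (lo + max_ahead)) else []
  let lows := window.map PySem.Str.lower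
  -- for a in stop_anchors: cut = next((i for i,l in enumerate(lows[:cut]) if a in l), cut)
  let cut := stop_anchors.foldl
    (fun cut a => (((lows.take cut).findIdx? (fun l => PySem.Str.isIn a l)).getD cut)) lows.length
  -- window[:cut] with 0 ≤ cut ≤ len(window) is List.take cut
  ((window.take cut).map PySem.Str.strip).filter (fun t => t ≠ "")

-- ===== PRECONDITION & SPEC =====
-- Pre_ restricts to the function's natural domain start_idx ≥ -1 (start_idx is a line index; the scan
-- starts at start_idx+1). For start_idx < -1 with max_ahead > 0, A's range produces negative indices, so
-- A either raises IndexError or wraps around via Python negative indexing — an accident no caller relies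
-- on — while B slices; max_ahead ≤ 0 stays inside since both then trivially return [].
def Pre_lines_between (lines : List String) (start_idx : Int) (stop_anchors : List String) (max_ahead : Int) : Prop :=
  -1 ≤ start_idx ∨ max_ahead ≤ 0
instance (lines : List String) (start_idx : Int) (stop_anchors : List String) (max_ahead : Int) : Decidable (Pre_lines_between lines start_idx stop_anchors max_ahead) := by unfold Pre_lines_between; infer_instance

def pvWitness_lines_between : List String × Int × List String × Int :=
  (["name: Ana", "  ", "idade: 3", "fim", "x"], 0, ["fim"], 8)

def Spec_lines_between (lines : List String) (start_idx : Int) (stop_anchors : List String) (max_ahead : Int) (out : List String) : Prop := out = lines_between_alt lines start_idx stop_anchors max_ahead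
instance (lines : List String) (start_idx : Int) (stop_anchors : List String) (max_ahead : Int) (out : List String) : Decidable (Spec_lines_between lines start_idx stop_anchors max_ahead out) := by unfold Spec_lines_between; infer_instance

-- ===== CLAIM (what is proved, stated in full; the proofs are below) =====
def Claim_equal_lines_between : Prop := ∀ (lines : List String) (start_idx : Int) (stop_anchors : List String) (max_ahead : Int), Dom_lines_between lines start_idx stop_anchors max_ahead → Pre_lines_between lines start_idx stop_anchors max_ahead → Spec_lines_between lines start_idx stop_anchors max_ahead (lines_between lines start_idx stop_anchors max_ahead)

-- ===== LEMMAS AND PROOFS =====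

-- the common normal form both sides are reduced to: cut the window at the first
-- stop-anchor line, then strip and drop empties
def lbPhase (stop_anchors : List String) (w : List String) : List String :=
  ((w.takeWhile (fun l => !(stop_anchors.any (fun a => PySem.Str.isIn a (PySem.Str.lower l))))).map PySem.Str.strip).filter (fun t => t ≠ "")

-- A's loop over range l..h equals acc ++ lbPhase of the window drop/take
theorem lines_between_go_eq (lines sa : List String) (h : Int)
    (hh : h ≤ (lines.length : Int)) :
    ∀ (n : Nat) (l : Int), 0 ≤ l → (h - l).toNat ≤ n → ∀ acc,
    lines_between_go lines sa (PySem.List.pyRange l h 1) acc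
      = acc ++ lbPhase sa ((lines.drop l.toNat).take (h.toNat - l.toNat)) := by
  intro n
  induction n with
  | zero =>
    intro l hl hn acc
    have hle : h ≤ l := by omega
    have h0 : h.toNat - l.toNat = 0 := by omega
    rw [PySem.List.pyRange_one_eq_nil hle]
    simp [lines_between_go, h0, lbPhase]
  | succ n ih =>
    intro l hl hn acc
    by_cases hlh : h ≤ l
    · have h0 : h.toNat - l.toNat = 0 := by omega
      rw [PySem.List.pyRange_one_eq_nil hlh]
      simp [lines_between_go, h0, lbPhase]
    · have hlh' : l < h := by omega
      have hlt : l.toNat < lines.length := by omega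
      rw [PySem.List.pyRange_one_cons hlh']
      have hget : PySem.List.pyGet? lines l = some lines[l.toNat] :=
        PySem.List.pyGet?_eq_some_getElem lines hl (lt_of_lt_of_le hlh' hh)
      have hdrop : lines.drop l.toNat = lines[l.toNat] :: lines.drop (l.toNat + 1) :=
        List.drop_eq_getElem_cons hlt
      have htk : h.toNat - l.toNat = (h.toNat - (l.toNat + 1)) + 1 := by omega
      rw [hdrop, htk, List.take_succ_cons]
      show lines_between_go lines sa (l :: PySem.List.pyRange (l + 1) h 1) acc = _
      rw [lines_between_go, hget]
      dsimp only
      by_cases hb : sa.any (fun a => PySem.Str.isIn a (PySem.Str.lower lines[l.toNat])) = true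
      · rw [if_pos hb, lbPhase, List.takeWhile_cons, hb]
        simp
      · have hb' : (sa.any (fun a => PySem.Str.isIn a (PySem.Str.lower lines[l.toNat]))) = false :=
          Bool.eq_false_iff.mpr hb
        rw [if_neg hb]
        have hl1 : (0:Int) ≤ l + 1 := by omega
        have hn1 : (h - (l + 1)).toNat ≤ n := by omega
        have hcast : (l + 1).toNat = l.toNat + 1 := by omega
        have hIH := ih (l + 1) hl1 hn1
        rw [hcast] at hIH
        by_cases ht : PySem.Str.strip lines[l.toNat] ≠ ""
        · rw [if_pos ht, hIH]
          simp only [lbPhase, List.takeWhile_cons, hb', Bool.not_false, if_true,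
            List.map_cons, List.filter_cons]
          simp [ht]
        · rw [if_neg ht, hIH]
          simp only [ne_eq, not_not] at ht
          simp only [lbPhase, List.takeWhile_cons, hb', Bool.not_false, if_true,
            List.map_cons, List.filter_cons, ht]
          simp

-- B's anchor fold step: earliest hit of anchor a in the still-live prefix lows[:cut]
def lbStep (lows : List String) (cut : Nat) (a : String) : Nat :=
  ((lows.take cut).findIdx? (fun l => PySem.Str.isIn a l)).getD cut

theorem lbStep_nil (anchors : List String) (c : Nat) :
    anchors.foldl (lbStep []) c = c := by
  induction anchors generalizing c with
  | nil => rfl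
  | cons a as ih => simp [List.foldl_cons, lbStep, List.findIdx?_nil, ih]

theorem lbStep_zero_step (lows : List String) (a : String) : lbStep lows 0 a = 0 := by
  simp [lbStep]

theorem lbStep_zero (anchors lows : List String) :
    anchors.foldl (lbStep lows) 0 = 0 := by
  induction anchors with
  | nil => rfl
  | cons a as ih => simpa [List.foldl_cons, lbStep_zero_step] using ih

theorem lbStep_hit (anchors : List String) (l : String) (rest : List String) (c : Nat)
    (h : ∃ a ∈ anchors, PySem.Str.isIn a l = true) :
    anchors.foldl (lbStep (l :: rest)) c = 0 := by
  induction anchors generalizing c with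
  | nil => simp at h
  | cons a as ih =>
    rcases h with ⟨b, hb, hbl⟩
    rcases List.mem_cons.mp hb with rfl | hb'
    · rw [List.foldl_cons]
      have hstep : lbStep (l :: rest) c b = 0 := by
        cases c with
        | zero => exact lbStep_zero_step _ _
        | succ k =>
          rw [lbStep, List.take_succ_cons, List.findIdx?_cons, hbl]
          simp
      rw [hstep]
      exact lbStep_zero as (l :: rest)
    · exact ih _ ⟨b, hb', hbl⟩

theorem lbStep_shift (anchors : List String) (l : String) (rest : List String) (c : Nat)
    (h : ∀ a ∈ anchors, PySem.Str.isIn a l = false) :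
    anchors.foldl (lbStep (l :: rest)) (c + 1) = anchors.foldl (lbStep rest) c + 1 := by
  induction anchors generalizing c with
  | nil => rfl
  | cons a as ih =>
    have ha : PySem.Str.isIn a l = false := h a List.mem_cons_self
    rw [List.foldl_cons, List.foldl_cons]
    have hstep : lbStep (l :: rest) (c + 1) a = lbStep rest c a + 1 := by
      rw [lbStep, lbStep, List.take_succ_cons, List.findIdx?_cons, ha]
      cases hf : (rest.take c).findIdx? (fun x => PySem.Str.isIn a x) with
      | none => simp
      | some i => simp
    rw [hstep]
    exact ih _ (fun b hb => h b (List.mem_cons_of_mem a hb))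

-- the fold computes the takeWhile length
theorem lbCut_eq (lows anchors : List String) :
    anchors.foldl (lbStep lows) lows.length
      = (lows.takeWhile (fun l => !(anchors.any (fun a => PySem.Str.isIn a l)))).length := by
  induction lows with
  | nil => simp [lbStep_nil]
  | cons l rest ih =>
    by_cases h : anchors.any (fun a => PySem.Str.isIn a l) = true
    · rcases List.any_eq_true.mp h with ⟨a, ha, hal⟩
      rw [lbStep_hit anchors l rest _ ⟨a, ha, hal⟩, List.takeWhile_cons, h]
      simp
    · have h' : (anchors.any (fun a => PySem.Str.isIn a l)) = false := Bool.eq_false_iff.mpr h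
      have hall : ∀ a ∈ anchors, PySem.Str.isIn a l = false := by
        intro a ha
        exact Bool.eq_false_iff.mpr (fun hc => h (List.any_eq_true.mpr ⟨a, ha, hc⟩))
      rw [List.length_cons, lbStep_shift anchors l rest rest.length hall, ih,
        List.takeWhile_cons, h']
      simp

-- take of the takeWhile length is takeWhile (it is a prefix)
theorem take_length_takeWhile {α : Type} (p : α → Bool) (l : List α) :
    l.take (l.takeWhile p).length = l.takeWhile p :=
  (List.prefix_iff_eq_take.mp (List.takeWhile_prefix p)).symm

-- B equals lbPhase of its window
theorem alt_eq_lbPhase (lines : List String) (start_idx : Int) (sa : List String) (max_ahead : Int) :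
    lines_between_alt lines start_idx sa max_ahead
      = lbPhase sa (if 0 < max_ahead then PySem.List.slice lines (some (start_idx + 1)) (some (start_idx + 1 + max_ahead)) else []) := by
  unfold lines_between_alt lbPhase
  set w := if 0 < max_ahead then PySem.List.slice lines (some (start_idx + 1)) (some (start_idx + 1 + max_ahead)) else [] with hw
  dsimp only
  have hcut : sa.foldl (fun cut a => ((((w.map PySem.Str.lower).take cut).findIdx? (fun l => PySem.Str.isIn a l)).getD cut)) (w.map PySem.Str.lower).length
      = (w.takeWhile (fun l => !(sa.any (fun a => PySem.Str.isIn a (PySem.Str.lower l))))).length := by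
    rw [show (fun cut a => ((((w.map PySem.Str.lower).take cut).findIdx? (fun l => PySem.Str.isIn a l)).getD cut)) = lbStep (w.map PySem.Str.lower) from rfl,
      lbCut_eq, List.takeWhile_map, List.length_map]
    rfl
  rw [hcut, take_length_takeWhile]

theorem lines_between_spec : Claim_equal_lines_between := by
  intro lines start_idx stop_anchors max_ahead _hdom hpre
  unfold Spec_lines_between
  rw [alt_eq_lbPhase]
  unfold lines_between
  by_cases hma : 0 < max_ahead
  · have hl0 : (0 : Int) ≤ start_idx + 1 := by
      rcases hpre with h | h
      · omega
      · omega
    have hb0 : (0 : Int) ≤ start_idx + 1 + max_ahead := by omega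
    have hhile : min ((lines.length : Int)) (start_idx + 1 + max_ahead) ≤ (lines.length : Int) :=
      min_le_left _ _
    rw [lines_between_go_eq lines stop_anchors _ hhile
      ((min ((lines.length : Int)) (start_idx + 1 + max_ahead) - (start_idx + 1)).toNat) _ hl0 le_rfl [],
      if_pos hma, PySem.List.slice_toNat lines hl0 hb0]
    -- the slice clamps at lines.length exactly as min does
    have : ((min ((lines.length : Int)) (start_idx + 1 + max_ahead)).toNat - (start_idx + 1).toNat)
        = min ((lines.drop (start_idx + 1).toNat).length) ((start_idx + 1 + max_ahead).toNat - (start_idx + 1).toNat) := by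
      simp [List.length_drop]; omega
    rw [List.nil_append]
    congr 1
    rw [this, min_comm, ← List.take_take, List.take_length]
  · have hle : min ((lines.length : Int)) (start_idx + 1 + max_ahead) ≤ start_idx + 1 := by
      have := min_le_right ((lines.length : Int)) (start_idx + 1 + max_ahead); omega
    rw [PySem.List.pyRange_one_eq_nil hle, if_neg hma]
    simp [lines_between_go, lbPhase]
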